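-- pv_equiv track=rewrite | github.com/bootcamp-students/s23-warmups | Andrew_Ross/sq-to-rect.py | sq_in_rect
-- ===== SOURCE A (Python) =====
-- def sq_in_rect(lng, wdth):
--     if lng == wdth:
--         return None
--
--     squares = []
--
--     while lng != wdth:
--         max_side = min(lng, wdth)
--         squares.append(max_side)
--
--         if lng > wdth:
--             lng -= max_side
--         else:
--             wdth -= max_side
--
--     squares.append(lng)  # or wdth, they are equal at this point
--     return squares
-- ===== SOURCE B (Python) =====
-- def sq_in_rect(lng, wdth):
--     # Division-based Euclidean algorithm: each continued-fraction quotient q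
--     # emits q equal squares at once instead of one per subtraction step.
--     if lng == wdth:
--         return None
--     squares = []
--     a, b = lng, wdth
--     while b != 0:
--         q = a // b
--         squares.extend([b] * q)
--         a, b = b, a % b
--     return squares
-- ===== Notes on version B (the rewrite author's own statement) =====
-- stated objective: faster
-- what changed: Replaced the one-square-per-iteration repeated-subtraction loop by the division-based Euclidean algorithm that emits each run of q equal squares with a single a//b quotient.
import Mathlib
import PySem

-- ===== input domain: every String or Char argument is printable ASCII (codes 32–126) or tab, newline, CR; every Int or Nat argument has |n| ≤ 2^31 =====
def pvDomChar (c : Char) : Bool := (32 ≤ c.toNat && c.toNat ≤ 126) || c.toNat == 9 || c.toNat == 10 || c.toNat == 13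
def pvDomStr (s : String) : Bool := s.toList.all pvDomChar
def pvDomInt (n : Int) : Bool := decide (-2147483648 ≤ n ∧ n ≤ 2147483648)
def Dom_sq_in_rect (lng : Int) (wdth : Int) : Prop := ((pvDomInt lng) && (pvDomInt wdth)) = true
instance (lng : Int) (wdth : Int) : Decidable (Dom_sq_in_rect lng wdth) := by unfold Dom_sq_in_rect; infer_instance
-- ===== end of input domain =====

-- B replaces A's repeated-subtraction square listing by the division-based Euclidean
-- algorithm (one a//b quotient per run of equal squares): asymptotically fewer iterations.
-- Pre_ excludes unequal inputs with a nonpositive side, on which A's while loop never terminates.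


-- ===== PORT A =====
-- A's while loop, with fuel (= an upper bound on the number of iterations on inputs
-- satisfying Pre_); 'none' on fuel exhaustion marks the inputs where the Python loop
-- diverges — those are excluded by Pre_.
def sqSubLoop : Nat → Int → Int → List Int → Option (List Int)
  | 0, _, _, _ => none
  | fuel + 1, lng, wdth, squares =>
    if lng = wdth then some (squares ++ [lng])
    else
      let max_side := min lng wdth
      if lng > wdth then sqSubLoop fuel (lng - max_side) wdth (squares ++ [max_side])
      else sqSubLoop fuel lng (wdth - max_side) (squares ++ [max_side])

def sq_in_rect (lng : Int) (wdth : Int) : Option (List Int) :=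
  if lng = wdth then none
  else sqSubLoop ((lng + wdth).toNat + 1) lng wdth []

-- ===== PORT B =====
-- Source B's 'while b != 0' loop; [b]*q ported exactly as List.replicate q.toNat b
-- (Python's [b]*q is empty for q ≤ 0).
def euclidLoop (a : Int) (b : Int) (squares : List Int) : List Int :=
  if _hb : b = 0 then squares
  else euclidLoop b (PySem.Int.mod a b)
        (squares ++ List.replicate (PySem.Int.floordiv a b).toNat b)
termination_by b.natAbs
decreasing_by
  rcases lt_trichotomy b 0 with h | h | h
  · have := PySem.Int.mod_neg_bounds (a := a) h; omega
  · exact absurd h _hb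
  · have h1 := PySem.Int.mod_nonneg (a := a) h
    have h2 := PySem.Int.mod_lt (a := a) h
    omega

def sq_in_rect_alt (lng : Int) (wdth : Int) : Option (List Int) :=
  if lng = wdth then none
  else some (euclidLoop lng wdth [])

-- ===== PRECONDITION & SPEC =====
-- Pre_ excludes exactly the inputs where A never returns: with lng ≠ wdth and a
-- nonpositive side, A's subtraction loop diverges.
def Pre_sq_in_rect (lng : Int) (wdth : Int) : Prop :=
  lng = wdth ∨ (0 < lng ∧ 0 < wdth)
instance (lng : Int) (wdth : Int) : Decidable (Pre_sq_in_rect lng wdth) := by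
  unfold Pre_sq_in_rect; infer_instance

def pvWitness_sq_in_rect : Int × Int := (5, 3)

def Spec_sq_in_rect (lng : Int) (wdth : Int) (out : Option (List Int)) : Prop :=
  out = sq_in_rect_alt lng wdth
instance (lng : Int) (wdth : Int) (out : Option (List Int)) : Decidable (Spec_sq_in_rect lng wdth out) := by
  unfold Spec_sq_in_rect; infer_instance

-- ===== CLAIM (what is proved, stated in full; the proofs are below) =====
def Claim_equal_sq_in_rect : Prop := ∀ (lng : Int) (wdth : Int), Dom_sq_in_rect lng wdth → Pre_sq_in_rect lng wdth → Spec_sq_in_rect lng wdth (sq_in_rect lng wdth)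

-- ===== LEMMAS AND PROOFS =====

-- 0 < b and -b < k*b < b force k = 0 (used to identify quotient/remainder pairs).
theorem mul_self_bound_zero {k b : Int} (hb : 0 < b) (h1 : -b < k * b) (h2 : k * b < b) :
    k = 0 := by
  rcases lt_trichotomy k 0 with h | h | h
  · have : k ≤ -1 := by omega
    have : k * b ≤ -1 * b := mul_le_mul_of_nonneg_right this (le_of_lt hb)
    omega
  · exact h
  · have : 1 ≤ k := by omega
    have : 1 * b ≤ k * b := mul_le_mul_of_nonneg_right this (le_of_lt hb)
    omega

-- 0 < b and -b < k*b force 0 ≤ k.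
theorem nonneg_of_mul_gt_neg {k b : Int} (hb : 0 < b) (h1 : -b < k * b) : 0 ≤ k := by
  by_contra h
  have : k ≤ -1 := by omega
  have : k * b ≤ -1 * b := mul_le_mul_of_nonneg_right this (le_of_lt hb)
  omega

-- One unfolding of euclidLoop for b ≠ 0.
theorem euclidLoop_step (a b : Int) (acc : List Int) (hb : b ≠ 0) :
    euclidLoop a b acc
      = euclidLoop b (PySem.Int.mod a b)
          (acc ++ List.replicate (PySem.Int.floordiv a b).toNat b) := by
  rw [euclidLoop]; rw [dif_neg hb]

theorem euclidLoop_zero (a : Int) (acc : List Int) : euclidLoop a 0 acc = acc := by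
  rw [euclidLoop]; simp

-- On equal positive sides the Euclidean loop emits exactly one square.
theorem euclidLoop_self (a : Int) (ha : 0 < a) (acc : List Int) :
    euclidLoop a a acc = acc ++ [a] := by
  rw [euclidLoop_step a a acc (by omega)]
  have hd : PySem.Int.floordiv a a = 1 := by
    rw [PySem.Int.floordiv_eq_iff_of_pos ha]; omega
  have h3 := PySem.Int.floordiv_mul_add_mod a a
  rw [hd] at h3
  have hm : PySem.Int.mod a a = 0 := by omega
  rw [hd, hm, euclidLoop_zero]; simp

-- Peeling one subtraction off the dividend.
theorem euclidLoop_sub (a b : Int) (hb : 0 < b) (hab : b < a) (acc : List Int) :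
    euclidLoop a b acc = euclidLoop (a - b) b (acc ++ [b]) := by
  rw [euclidLoop_step a b acc (by omega), euclidLoop_step (a - b) b (acc ++ [b]) (by omega)]
  have h1 := PySem.Int.mod_nonneg (a := a) hb
  have h2 := PySem.Int.mod_lt (a := a) hb
  have h3 := PySem.Int.floordiv_mul_add_mod a b
  have h1' := PySem.Int.mod_nonneg (a := a - b) hb
  have h2' := PySem.Int.mod_lt (a := a - b) hb
  have h3' := PySem.Int.floordiv_mul_add_mod (a - b) b
  have hk : (PySem.Int.floordiv a b - PySem.Int.floordiv (a - b) b - 1) * b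
      = PySem.Int.mod (a - b) b - PySem.Int.mod a b := by
    have : (PySem.Int.floordiv a b - PySem.Int.floordiv (a - b) b - 1) * b
        = PySem.Int.floordiv a b * b - PySem.Int.floordiv (a - b) b * b - b := by ring
    omega
  have hk0 : PySem.Int.floordiv a b - PySem.Int.floordiv (a - b) b - 1 = 0 :=
    mul_self_bound_zero hb (by omega) (by omega)
  have hmod : PySem.Int.mod a b = PySem.Int.mod (a - b) b := by
    rw [hk0] at hk; omega
  have hdiv : PySem.Int.floordiv a b = PySem.Int.floordiv (a - b) b + 1 := by omega
  have hq : 0 ≤ PySem.Int.floordiv (a - b) b := by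
    refine nonneg_of_mul_gt_neg hb ?_
    omega
  rw [hmod, hdiv]
  congr 1
  rw [show (PySem.Int.floordiv (a - b) b + 1).toNat
        = (PySem.Int.floordiv (a - b) b).toNat + 1 from by omega,
      List.replicate_succ]
  simp

-- A quotient of 0: a < b swaps the arguments without emitting anything.
theorem euclidLoop_swap_lt (a b : Int) (ha : 0 < a) (hab : a < b) (acc : List Int) :
    euclidLoop a b acc = euclidLoop b a acc := by
  rw [euclidLoop_step a b acc (by omega)]
  have hd : PySem.Int.floordiv a b = 0 := by
    rw [PySem.Int.floordiv_eq_iff_of_pos (by omega)]; omega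
  have h3 := PySem.Int.floordiv_mul_add_mod a b
  rw [hd] at h3
  have hm : PySem.Int.mod a b = a := by omega
  rw [hd, hm]; simp

-- The Euclidean loop is symmetric in its two sides for positive inputs.
theorem euclidLoop_comm (a b : Int) (ha : 0 < a) (hb : 0 < b) (acc : List Int) :
    euclidLoop a b acc = euclidLoop b a acc := by
  rcases lt_trichotomy a b with h | h | h
  · exact euclidLoop_swap_lt a b ha h acc
  · rw [h]
  · exact (euclidLoop_swap_lt b a hb h acc).symm

-- Main simulation: with enough fuel the subtraction loop computes exactly what the
-- Euclidean loop computes, for positive sides.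
theorem sqSubLoop_eq_euclid (fuel : Nat) :
    ∀ (a b : Int) (acc : List Int), 0 < a → 0 < b → (a + b).toNat ≤ fuel →
      sqSubLoop fuel a b acc = some (euclidLoop a b acc) := by
  induction fuel with
  | zero => intro a b acc ha hb hf; omega
  | succ n ih =>
    intro a b acc ha hb hf
    rcases lt_trichotomy a b with h | h | h
    · -- a < b: subtract a from b
      rw [show sqSubLoop (n + 1) a b acc
            = sqSubLoop n a (b - min a b) (acc ++ [min a b]) from by
          simp only [sqSubLoop]
          rw [if_neg (show ¬ a = b by omega), if_neg (show ¬ a > b by omega)],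
        show min a b = a from by omega]
      rw [ih a (b - a) (acc ++ [a]) ha (by omega) (by omega)]
      rw [euclidLoop_comm a (b - a) ha (by omega), ← euclidLoop_sub b a ha h,
          euclidLoop_comm b a hb ha]
    · -- equal: final square
      rw [h]
      simp [sqSubLoop, euclidLoop_self b hb]
    · -- a > b: subtract b from a
      rw [show sqSubLoop (n + 1) a b acc
            = sqSubLoop n (a - min a b) b (acc ++ [min a b]) from by
          simp only [sqSubLoop]
          rw [if_neg (show ¬ a = b by omega), if_pos (show a > b from h)],
        show min a b = b from by omega]
      rw [ih (a - b) b (acc ++ [b]) (by omega) hb (by omega)]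
      rw [← euclidLoop_sub a b hb h]

-- ===== VERDICT (by name: the statement is the Claim_ definition above) =====
theorem sq_in_rect_spec : Claim_equal_sq_in_rect := by
  intro lng wdth _ hpre
  unfold Spec_sq_in_rect sq_in_rect sq_in_rect_alt
  by_cases h : lng = wdth
  · simp [h]
  · rcases hpre with h' | ⟨hl, hw⟩
    · exact absurd h' h
    · rw [if_neg h, if_neg h]
      exact sqSubLoop_eq_euclid _ lng wdth [] hl hw (by omega)
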